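-- pv_equiv track=rewrite | github.com/amazing-hyunho/richguysgogo | committee/tools/bok_trade_provider.py | _add_months
-- ===== SOURCE A (Python) =====
-- def _add_months(year: int, month: int, delta: int) -> tuple[int, int]:
--     m = month + delta
--     y = year
--     while m > 12:
--         m -= 12
--         y += 1
--     while m < 1:
--         m += 12
--         y -= 1
--     return y, m
-- ===== SOURCE B (Python) =====
-- def _add_months(year: int, month: int, delta: int) -> tuple[int, int]:
--     t = month + delta - 1
--     return year + t // 12, t % 12 + 1
-- ===== Notes on version B (the rewrite author's own statement) =====
-- stated objective: simpler
-- what changed: Replaced the two normalization while-loops with a single closed-form divmod on the zero-based month total (t = month + delta - 1), using Python floor division/modulo.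
import Mathlib
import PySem

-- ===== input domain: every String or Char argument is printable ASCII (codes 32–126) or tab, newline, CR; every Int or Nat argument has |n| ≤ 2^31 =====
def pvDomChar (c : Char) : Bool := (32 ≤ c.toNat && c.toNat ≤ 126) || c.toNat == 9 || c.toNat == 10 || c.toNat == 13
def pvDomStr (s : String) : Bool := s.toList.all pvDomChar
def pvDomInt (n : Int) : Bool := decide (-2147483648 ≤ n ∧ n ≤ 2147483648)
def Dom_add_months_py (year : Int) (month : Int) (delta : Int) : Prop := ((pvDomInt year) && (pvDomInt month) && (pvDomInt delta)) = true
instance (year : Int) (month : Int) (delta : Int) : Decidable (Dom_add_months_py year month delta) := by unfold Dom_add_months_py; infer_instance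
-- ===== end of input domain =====

-- B replaces A's two while-loops with one closed-form floor divmod; equivalence proved for all inputs (A is total).

-- ===== PORT A =====
-- while m > 12: m -= 12; y += 1   (fuel = m.toNat, a bound on the iteration count; only a totality guard)
def addMonthsLoopUp (fuel : Nat) (y m : Int) : Int × Int :=
  match fuel with
  | 0 => (y, m)
  | fuel + 1 => if m > 12 then addMonthsLoopUp fuel (y + 1) (m - 12) else (y, m)

-- while m < 1: m += 12; y -= 1   (fuel = (1 - m).toNat; only a totality guard)
def addMonthsLoopDown (fuel : Nat) (y m : Int) : Int × Int :=
  match fuel with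
  | 0 => (y, m)
  | fuel + 1 => if m < 1 then addMonthsLoopDown fuel (y - 1) (m + 12) else (y, m)

def add_months_py (year : Int) (month : Int) (delta : Int) : Int × Int :=
  let m := month + delta
  let y := year
  let p := addMonthsLoopUp m.toNat y m
  addMonthsLoopDown (1 - p.2).toNat p.1 p.2

-- ===== PORT B =====
def add_months_py_alt (year : Int) (month : Int) (delta : Int) : Int × Int :=
  let t := month + delta - 1
  (year + PySem.Int.floordiv t 12, PySem.Int.mod t 12 + 1)

-- ===== PRECONDITION & SPEC =====
def Spec_add_months_py (year : Int) (month : Int) (delta : Int) (out : Int × Int) : Prop := out = add_months_py_alt year month delta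
instance (year : Int) (month : Int) (delta : Int) (out : Int × Int) : Decidable (Spec_add_months_py year month delta out) := by unfold Spec_add_months_py; infer_instance

-- ===== CLAIM (what is proved, stated in full; the proofs are below) =====
def Claim_equal_add_months_py : Prop := ∀ (year : Int) (month : Int) (delta : Int), Dom_add_months_py year month delta → Spec_add_months_py year month delta (add_months_py year month delta)

-- ===== LEMMAS AND PROOFS =====

theorem addMonthsLoopUp_closed : ∀ (fuel : Nat) (m y : Int), m.toNat ≤ fuel → 1 ≤ m →
    addMonthsLoopUp fuel y m = (y + (m - 1) / 12, (m - 1) % 12 + 1) := by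
  intro fuel
  induction fuel with
  | zero => intro m y hk hm; omega
  | succ n ih =>
    intro m y hk hm
    rw [addMonthsLoopUp]
    split_ifs with h
    · rw [ih (m - 12) (y + 1) (by omega) (by omega)]
      simp only [Prod.mk.injEq]
      constructor <;> omega
    · simp only [Prod.mk.injEq]
      constructor <;> omega

theorem addMonthsLoopUp_id (fuel : Nat) (y m : Int) (hm : m ≤ 12) :
    addMonthsLoopUp fuel y m = (y, m) := by
  cases fuel with
  | zero => rfl
  | succ n => rw [addMonthsLoopUp, if_neg (by omega)]

theorem addMonthsLoopDown_closed : ∀ (fuel : Nat) (m y : Int), (1 - m).toNat ≤ fuel → m ≤ 12 →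
    addMonthsLoopDown fuel y m = (y + (m - 1) / 12, (m - 1) % 12 + 1) := by
  intro fuel
  induction fuel with
  | zero =>
    intro m y hk hm
    rw [addMonthsLoopDown]
    simp only [Prod.mk.injEq]
    constructor <;> omega
  | succ n ih =>
    intro m y hk hm
    rw [addMonthsLoopDown]
    split_ifs with h
    · rw [ih (m + 12) (y - 1) (by omega) (by omega)]
      simp only [Prod.mk.injEq]
      constructor <;> omega
    · simp only [Prod.mk.injEq]
      constructor <;> omega

-- ===== VERDICT (by name: the statement is the Claim_ definition above) =====
theorem add_months_py_spec : Claim_equal_add_months_py := by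
  intro year month delta _
  unfold Spec_add_months_py add_months_py add_months_py_alt
  simp only
  rw [PySem.Int.floordiv_eq_ediv_of_pos (by norm_num), PySem.Int.mod_eq_emod_of_pos (by norm_num)]
  set m := month + delta with hm
  by_cases h1 : 1 ≤ m
  · rw [addMonthsLoopUp_closed m.toNat m year le_rfl h1]
    have h2 : (m - 1) % 12 + 1 ≤ 12 := by omega
    rw [addMonthsLoopDown_closed _ _ _ le_rfl h2]
    simp only [Prod.mk.injEq]
    constructor <;> omega
  · rw [addMonthsLoopUp_id _ _ _ (by omega)]
    exact addMonthsLoopDown_closed _ m year le_rfl (by omega)
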